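-- pv_equiv track=rewrite | github.com/KRATOS-AI-Bot/Project_Heimdall | heimdall.py | scan_logs
-- ===== SOURCE A (Python) =====
-- def scan_logs(logs):
--     keywords = ['error', 'critical', 'fatal', 'traceback', 'exception', 'panic', 'warn']
--     indices = []
--     for i, log in enumerate(logs):
--         for keyword in keywords:
--             if keyword in log.lower():
--                 indices.append(i)
--                 break
--     return indices
-- ===== SOURCE B (Python) =====
-- # B: position-major scan -- for each log, walk the lowered text once and at each
-- # position consult a first-letter bucket table of keywords, testing only those
-- # keywords that can start there; A instead runs a keyword-major substring search.
-- _BY_FIRST = {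
--     'e': ('error', 'exception'),
--     'c': ('critical',),
--     'f': ('fatal',),
--     't': ('traceback',),
--     'p': ('panic',),
--     'w': ('warn',),
-- }
--
-- def _hit(low):
--     for j, ch in enumerate(low):
--         for k in _BY_FIRST.get(ch, ()):
--             if low.startswith(k, j):
--                 return True
--     return False
--
-- def scan_logs(logs):
--     return [i for i, log in enumerate(logs) if _hit(log.lower())]
-- ===== Notes on version B (the rewrite author's own statement) =====
-- stated objective: alternative
-- what changed: Replaces the keyword-major loop (seven independent substring searches per log) by a single position-major pass over the lowered log that uses a first-letter bucket table to test only the keywords that can start at each position, and builds the result as a comprehension over enumerate instead of append-with-break.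
import Mathlib
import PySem

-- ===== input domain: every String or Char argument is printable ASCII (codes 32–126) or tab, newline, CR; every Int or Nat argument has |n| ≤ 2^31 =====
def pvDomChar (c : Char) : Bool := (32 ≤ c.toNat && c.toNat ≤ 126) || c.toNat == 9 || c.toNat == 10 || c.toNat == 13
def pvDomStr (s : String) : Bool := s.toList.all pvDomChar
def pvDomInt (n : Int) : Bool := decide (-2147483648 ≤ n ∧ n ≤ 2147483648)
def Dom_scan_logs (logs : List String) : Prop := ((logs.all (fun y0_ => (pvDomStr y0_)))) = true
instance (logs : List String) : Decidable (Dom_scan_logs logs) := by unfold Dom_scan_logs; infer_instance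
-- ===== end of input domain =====

-- B replaces A's keyword-major substring search by a single position-major pass with a
-- first-letter bucket table (objective: alternative algorithm, same result).

-- ===== PORT A =====
def pvKeywords : List String :=
  ["error", "critical", "fatal", "traceback", "exception", "panic", "warn"]

-- inner 'for keyword in keywords: if keyword in log.lower(): … break'
def pvKwHit : List String → String → Bool
  | [], _ => false
  | k :: rest, log =>
      if PySem.Str.isIn k (PySem.Str.lower log) then true else pvKwHit rest log

def scan_logs (logs : List String) : List Int :=
  (PySem.List.enumerate logs).foldl
    (fun indices p => if pvKwHit pvKeywords p.2 then indices ++ [p.1] else indices) []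

-- ===== PORT B =====
-- the dict _BY_FIRST, looked up with .get(ch, ()); keywords kept as char lists
def pvByFirst (c : Char) : List (List Char) :=
  if c = 'e' then [['e','r','r','o','r'], ['e','x','c','e','p','t','i','o','n']]
  else if c = 'c' then [['c','r','i','t','i','c','a','l']]
  else if c = 'f' then [['f','a','t','a','l']]
  else if c = 't' then [['t','r','a','c','e','b','a','c','k']]
  else if c = 'p' then [['p','a','n','i','c']]
  else if c = 'w' then [['w','a','r','n']]
  else []

-- _hit: walk the positions of low; low.startswith(k, j) = k prefix of the suffix at j
def pvHit : List Char → Bool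
  | [] => false
  | c :: rest => (pvByFirst c).any (fun k => k.isPrefixOf (c :: rest)) || pvHit rest

def scan_logs_alt (logs : List String) : List Int :=
  (PySem.List.enumerate logs).filterMap
    (fun p => if pvHit (PySem.Str.lower p.2).toList then some p.1 else none)

-- ===== PRECONDITION & SPEC =====
def Spec_scan_logs (logs : List String) (out : List Int) : Prop := out = scan_logs_alt logs
instance (logs : List String) (out : List Int) : Decidable (Spec_scan_logs logs out) := by unfold Spec_scan_logs; infer_instance

-- ===== CLAIM (what is proved, stated in full; the proofs are below) =====
def Claim_equal_scan_logs : Prop := ∀ (logs : List String), Dom_scan_logs logs → Spec_scan_logs logs (scan_logs logs)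

-- ===== LEMMAS AND PROOFS =====

-- keyword char lists
def pvKws : List (List Char) :=
  [['e','r','r','o','r'], ['c','r','i','t','i','c','a','l'], ['f','a','t','a','l'],
   ['t','r','a','c','e','b','a','c','k'], ['e','x','c','e','p','t','i','o','n'],
   ['p','a','n','i','c'], ['w','a','r','n']]

theorem pvKws_eq : pvKeywords.map String.toList = pvKws := by decide

theorem pvKwHit_eq_any (ks : List String) (log : String) :
    pvKwHit ks log = ks.any (fun k => PySem.Str.isIn k (PySem.Str.lower log)) := by
  induction ks with
  | nil => rfl
  | cons k rest ih =>
      simp only [pvKwHit, List.any_cons, ih]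
      split_ifs with h
      · rw [h, Bool.true_or]
      · rw [Bool.not_eq_true] at h
        rw [h, Bool.false_or]

theorem pvKwHit_iff (log : String) :
    pvKwHit pvKeywords log = true ↔ ∃ k ∈ pvKws, k <:+: (PySem.Str.lower log).toList := by
  rw [pvKwHit_eq_any, List.any_eq_true]
  constructor
  · rintro ⟨k, hk, h⟩
    exact ⟨k.toList, pvKws_eq ▸ List.mem_map_of_mem hk, (PySem.Str.isIn_iff_infix _ _).1 h⟩
  · rintro ⟨k, hk, h⟩
    rcases List.mem_map.1 (pvKws_eq ▸ hk) with ⟨s, hs, rfl⟩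
    exact ⟨s, hs, (PySem.Str.isIn_iff_infix _ _).2 h⟩

theorem pvByFirst_sub {c : Char} {k : List Char} (h : k ∈ pvByFirst c) : k ∈ pvKws := by
  unfold pvByFirst at h
  split_ifs at h <;> simp_all [pvKws] <;> rcases h with h | h <;> simp [h]

theorem mem_byFirst_of_prefix {k : List Char} (hk : k ∈ pvKws) {c : Char} {rest : List Char}
    (hp : k <+: c :: rest) : k ∈ pvByFirst c := by
  fin_cases hk <;>
    (rw [List.cons_prefix_cons] at hp; obtain ⟨rfl, -⟩ := hp; simp [pvByFirst])

theorem pvHit_iff (low : List Char) :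
    pvHit low = true ↔ ∃ k ∈ pvKws, k <:+: low := by
  induction low with
  | nil =>
      simp only [pvHit]
      decide
  | cons c rest ih =>
      simp only [pvHit, Bool.or_eq_true, List.any_eq_true, ih]
      constructor
      · rintro (⟨k, hk, h⟩ | ⟨k, hk, h⟩)
        · exact ⟨k, pvByFirst_sub hk, (List.isPrefixOf_iff_prefix.1 h).isInfix⟩
        · exact ⟨k, hk, h.trans (List.suffix_cons c rest).isInfix⟩
      · rintro ⟨k, hk, h⟩
        rcases List.infix_cons_iff.1 h with h | h
        · exact Or.inl ⟨k, mem_byFirst_of_prefix hk h, List.isPrefixOf_iff_prefix.2 h⟩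
        · exact Or.inr ⟨k, hk, h⟩

theorem pvHit_eq_kwHit (log : String) :
    pvHit (PySem.Str.lower log).toList = pvKwHit pvKeywords log := by
  rw [Bool.eq_iff_iff, pvHit_iff, pvKwHit_iff]

theorem filterMap_if {α β : Type} (c : α → Bool) (f : α → β) (l : List α) :
    l.filterMap (fun x => if c x then some (f x) else none) = (l.filter c).map f := by
  induction l with
  | nil => rfl
  | cons x xs ih => by_cases h : c x <;> simp [h, ih]

theorem scan_logs_spec' (logs : List String) : scan_logs logs = scan_logs_alt logs := by
  unfold scan_logs scan_logs_alt
  rw [PySem.List.foldl_append_if, filterMap_if, List.nil_append]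
  simp only [pvHit_eq_kwHit]

-- ===== VERDICT (by name: the statement is the Claim_ definition above) =====
theorem scan_logs_spec : Claim_equal_scan_logs := by
  intro logs _
  exact scan_logs_spec' logs
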